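-- pv_equiv track=rewrite | github.com/AniruthSuresh/3D-Fusion-Helpers | Lab-data-zarr-converting/src/get-eef-from-complete-data.py | align_to
-- ===== SOURCE A (Python) =====
-- from bisect import bisect_left
--
-- def align_to(reference_ts, target_ts):
--     """Align target timestamps to reference timestamps."""
--     idx = []
--     for ts in reference_ts:
--         pos = bisect_left(target_ts, ts)
--         if pos == 0:
--             idx.append(0)
--         elif pos == len(target_ts):
--             idx.append(len(target_ts)-1)
--         else:
--             if abs(target_ts[pos]-ts) < abs(target_ts[pos-1]-ts):
--                 idx.append(pos)
--             else:
--                 idx.append(pos-1)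
--     return idx
-- ===== SOURCE B (Python) =====
-- def align_to(reference_ts, target_ts):
--     """Align target timestamps to reference timestamps."""
--     n = len(target_ts)
--
--     def locate(lst, x):
--         # insertion point by recursive halving on slices
--         if not lst:
--             return 0
--         mid = len(lst) // 2
--         if lst[mid] < x:
--             return mid + 1 + locate(lst[mid + 1:], x)
--         return locate(lst[:mid], x)
--
--     idx = []
--     for ts in reference_ts:
--         pos = locate(target_ts, ts)
--         cands = [i for i in (pos - 1, pos) if 0 <= i < n]
--         idx.append(min(cands, key=lambda i: abs(target_ts[i] - ts)))
--     return idx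
-- ===== Notes on version B (the rewrite author's own statement) =====
-- stated objective: alternative
-- what changed: The iterative lo/hi bisect_left loop becomes a recursive halving on list slices, and the three-way if/elif boundary-and-neighbour branching becomes building the in-range candidate indices [pos-1, pos] and taking min by distance (Python's min keeps the earlier index on ties, matching A's tie-break).
-- outside the precondition, e.g. on align_to([1], []): A returns [0], B raises ValueError
import Mathlib
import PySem

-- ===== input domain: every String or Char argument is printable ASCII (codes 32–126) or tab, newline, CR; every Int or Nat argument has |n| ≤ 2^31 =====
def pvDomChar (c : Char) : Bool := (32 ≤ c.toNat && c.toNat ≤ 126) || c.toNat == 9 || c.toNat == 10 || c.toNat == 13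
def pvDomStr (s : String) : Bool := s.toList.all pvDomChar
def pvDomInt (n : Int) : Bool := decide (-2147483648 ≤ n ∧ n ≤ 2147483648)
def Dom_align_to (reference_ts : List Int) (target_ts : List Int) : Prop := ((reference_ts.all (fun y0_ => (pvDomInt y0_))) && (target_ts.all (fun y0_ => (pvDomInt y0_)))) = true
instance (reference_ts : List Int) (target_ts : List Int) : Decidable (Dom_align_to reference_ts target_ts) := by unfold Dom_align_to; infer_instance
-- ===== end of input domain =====

-- B replaces the iterative lo/hi bisect_left loop by a recursive halving on slices and the
-- three-way if/elif neighbour branching by a min over the in-range candidate indices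
-- (objective: alternative decomposition; not faster).

-- ===== PORT A =====
-- bisect.bisect_left(a, x, lo, hi): Python's 'while lo < hi' loop, transliterated (a[mid] is always
-- in range); the fuel parameter hi - lo only makes the loop total: it never runs out while lo < hi
def pyBisectLeftAux (fuel : Nat) (a : List Int) (x : Int) (lo hi : Nat) : Nat :=
  match fuel with
  | 0 => lo
  | fuel + 1 =>
    if lo < hi then
      let mid := (lo + hi) / 2
      if PySem.List.pyGetD a (mid : Int) 0 < x then pyBisectLeftAux fuel a x (mid + 1) hi
      else pyBisectLeftAux fuel a x lo mid
    else lo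

def pyBisectLeft (a : List Int) (x : Int) (lo hi : Nat) : Nat :=
  pyBisectLeftAux (hi - lo) a x lo hi

def align_to (reference_ts : List Int) (target_ts : List Int) : List Int :=
  reference_ts.foldl (fun idx ts =>
    let pos := pyBisectLeft target_ts ts 0 target_ts.length
    if pos = 0 then idx ++ [(0 : Int)]
    else if pos = target_ts.length then idx ++ [(target_ts.length : Int) - 1]
    else if |PySem.List.pyGetD target_ts (pos : Int) 0 - ts| < |PySem.List.pyGetD target_ts ((pos : Int) - 1) 0 - ts| then idx ++ [(pos : Int)]
    else idx ++ [(pos : Int) - 1]) []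

-- ===== PORT B =====
-- locate(lst, x): insertion point by recursive halving on slices; lst[:mid] and lst[mid+1:] with
-- 0 ≤ mid < len(lst) are exactly List.take mid / List.drop (mid + 1)
def locate (lst : List Int) (x : Int) : Nat :=
  if h : lst.isEmpty then 0
  else
    let mid := lst.length / 2
    if PySem.List.pyGetD lst (mid : Int) 0 < x then mid + 1 + locate (lst.drop (mid + 1)) x
    else locate (lst.take mid) x
termination_by lst.length
decreasing_by
  all_goals
    (have hl : 0 < lst.length := by
      cases lst with
      | nil => simp at h
      | cons y l => simp
     simp [List.length_drop, List.length_take]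
     omega)

def align_to_alt (reference_ts : List Int) (target_ts : List Int) : List Int :=
  reference_ts.foldl (fun idx ts =>
    let pos := locate target_ts ts
    let cands := [((pos : Int) - 1), (pos : Int)].filter
      (fun i => decide (0 ≤ i) && decide (i < (target_ts.length : Int)))
    -- min(cands, key=lambda i: abs(target_ts[i] - ts)); none = ValueError on an empty candidate
    -- list (nonempty reference with empty target), excluded by Pre_align_to
    idx ++ [(PySem.List.min? cands (fun i => |PySem.List.pyGetD target_ts i 0 - ts|)).getD 0]) []

-- ===== PRECONDITION & SPEC =====
-- Pre_ excludes inputs with a nonempty reference list and an empty target list: there A returns 0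
-- as a nearest 'index' into the empty list while B's min over an empty candidate list raises
-- ValueError.
def Pre_align_to (reference_ts : List Int) (target_ts : List Int) : Prop :=
  reference_ts = [] ∨ target_ts ≠ []
instance (reference_ts : List Int) (target_ts : List Int) : Decidable (Pre_align_to reference_ts target_ts) := by unfold Pre_align_to; infer_instance
def pvWitness_align_to : List Int × List Int := ([3, 10], [1, 4, 9])

def Spec_align_to (reference_ts : List Int) (target_ts : List Int) (out : List Int) : Prop := out = align_to_alt reference_ts target_ts
instance (reference_ts : List Int) (target_ts : List Int) (out : List Int) : Decidable (Spec_align_to reference_ts target_ts out) := by unfold Spec_align_to; infer_instance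

-- ===== CLAIM (what is proved, stated in full; the proofs are below) =====
def Claim_equal_align_to : Prop := ∀ (reference_ts : List Int) (target_ts : List Int), Dom_align_to reference_ts target_ts → Pre_align_to reference_ts target_ts → Spec_align_to reference_ts target_ts (align_to reference_ts target_ts)

-- ===== LEMMAS AND PROOFS =====

-- A's per-element value
def A1 (target : List Int) (ts : Int) : Int :=
  let pos := pyBisectLeft target ts 0 target.length
  if pos = 0 then 0
  else if pos = target.length then (target.length : Int) - 1
  else if |PySem.List.pyGetD target (pos : Int) 0 - ts| < |PySem.List.pyGetD target ((pos : Int) - 1) 0 - ts| then (pos : Int)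
  else (pos : Int) - 1

-- B's per-element value
def B1 (target : List Int) (ts : Int) : Int :=
  let pos := locate target ts
  let cands := [((pos : Int) - 1), (pos : Int)].filter
    (fun i => decide (0 ≤ i) && decide (i < (target.length : Int)))
  (PySem.List.min? cands (fun i => |PySem.List.pyGetD target i 0 - ts|)).getD 0

lemma align_to_eq_map (reference_ts target_ts : List Int) :
    align_to reference_ts target_ts = reference_ts.map (fun ts => A1 target_ts ts) := by
  have hb : (fun (idx : List Int) ts =>
      let pos := pyBisectLeft target_ts ts 0 target_ts.length
      if pos = 0 then idx ++ [(0 : Int)]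
      else if pos = target_ts.length then idx ++ [(target_ts.length : Int) - 1]
      else if |PySem.List.pyGetD target_ts (pos : Int) 0 - ts| < |PySem.List.pyGetD target_ts ((pos : Int) - 1) 0 - ts| then idx ++ [(pos : Int)]
      else idx ++ [(pos : Int) - 1]) = (fun idx ts => idx ++ [A1 target_ts ts]) := by
    funext idx ts
    simp only [A1]
    split_ifs <;> rfl
  rw [align_to, hb, PySem.List.foldl_append_singleton_eq_map]
  simp

lemma alt_eq_map (reference_ts target_ts : List Int) :
    align_to_alt reference_ts target_ts = reference_ts.map (fun ts => B1 target_ts ts) := by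
  have hb : (fun (idx : List Int) ts =>
      let pos := locate target_ts ts
      let cands := [((pos : Int) - 1), (pos : Int)].filter
        (fun i => decide (0 ≤ i) && decide (i < (target_ts.length : Int)))
      idx ++ [(PySem.List.min? cands (fun i => |PySem.List.pyGetD target_ts i 0 - ts|)).getD 0])
      = (fun idx ts => idx ++ [B1 target_ts ts]) := by
    funext idx ts
    rfl
  rw [align_to_alt, hb, PySem.List.foldl_append_singleton_eq_map]
  simp

lemma bisect_bounds (a : List Int) (x : Int) :
    ∀ (k lo hi : Nat), lo ≤ hi →
      lo ≤ pyBisectLeftAux k a x lo hi ∧ pyBisectLeftAux k a x lo hi ≤ hi := by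
  intro k
  induction k with
  | zero => intro lo hi h; rw [pyBisectLeftAux]; omega
  | succ k ih =>
    intro lo hi h
    rw [pyBisectLeftAux]
    by_cases hlt : lo < hi
    · rw [if_pos hlt]
      by_cases hc : PySem.List.pyGetD a (((lo + hi) / 2 : Nat) : Int) 0 < x
      · rw [if_pos hc]
        have := ih ((lo + hi) / 2 + 1) hi (by omega)
        omega
      · rw [if_neg hc]
        have := ih lo ((lo + hi) / 2) (by omega)
        omega
    · rw [if_neg hlt]; omega

-- the iterative search on the window [lo, hi) equals the recursive search on the slice a[lo:hi]
lemma aux_eq_locate (a : List Int) (x : Int) :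
    ∀ (k lo hi : Nat), hi - lo ≤ k → lo ≤ hi → hi ≤ a.length →
      pyBisectLeftAux k a x lo hi = lo + locate ((a.drop lo).take (hi - lo)) x := by
  intro k
  induction k with
  | zero =>
    intro lo hi hk h1 h2
    have : hi - lo = 0 := by omega
    rw [pyBisectLeftAux, this]
    rw [show ((a.drop lo).take 0) = [] from List.take_zero]
    rw [locate]
    simp
  | succ k ih =>
    intro lo hi hk h1 h2
    by_cases hlt : lo < hi
    · have hsl : ((a.drop lo).take (hi - lo)).length = hi - lo := by
        simp [List.length_take, List.length_drop]
        omega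
      have hsne : ¬ ((a.drop lo).take (hi - lo)).isEmpty := by
        rw [List.isEmpty_iff, ← List.length_eq_zero_iff, hsl]
        omega
      rw [pyBisectLeftAux, if_pos hlt, locate, dif_neg hsne, hsl]
      have hmid : (hi - lo) / 2 + lo = (lo + hi) / 2 := by omega
      have hmlt : (hi - lo) / 2 < hi - lo := by omega
      have hval : PySem.List.pyGetD ((a.drop lo).take (hi - lo)) (((hi - lo) / 2 : Nat) : Int) 0
          = PySem.List.pyGetD a ((((lo + hi) / 2 : Nat) : Nat) : Int) 0 := by
        rw [PySem.List.pyGetD_natCast, PySem.List.pyGetD_natCast]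
        rw [List.getD_eq_getElem _ _ (by rw [hsl]; exact hmlt),
            List.getD_eq_getElem _ _ (by omega)]
        rw [List.getElem_take, List.getElem_drop]
        congr 1
        omega
      by_cases hc : PySem.List.pyGetD a ((((lo + hi) / 2 : Nat) : Nat) : Int) 0 < x
      · rw [if_pos hc, if_pos (by rw [hval]; exact hc)]
        rw [ih ((lo + hi) / 2 + 1) hi (by omega) (by omega) h2]
        have hdrop : ((a.drop lo).take (hi - lo)).drop ((hi - lo) / 2 + 1)
            = (a.drop ((lo + hi) / 2 + 1)).take (hi - ((lo + hi) / 2 + 1)) := by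
          rw [List.drop_take, List.drop_drop]
          congr 1
          · omega
          · congr 1
            omega
        rw [hdrop]
        omega
      · rw [if_neg hc, if_neg (by rw [hval]; exact hc)]
        rw [ih lo ((lo + hi) / 2) (by omega) (by omega) (by omega)]
        have htake : ((a.drop lo).take (hi - lo)).take ((hi - lo) / 2)
            = (a.drop lo).take ((lo + hi) / 2 - lo) := by
          rw [List.take_take]
          congr 1
          omega
        rw [htake]
    · have : hi - lo = 0 := by omega
      rw [pyBisectLeftAux, if_neg hlt, this]
      rw [show ((a.drop lo).take 0) = [] from List.take_zero]
      rw [locate]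
      simp

lemma bisect_eq_locate (a : List Int) (x : Int) :
    pyBisectLeft a x 0 a.length = locate a x := by
  rw [pyBisectLeft, aux_eq_locate a x (a.length - 0) 0 a.length (le_refl _) (by omega) (le_refl _)]
  simp

lemma min?_pair (a b : Int) (f : Int → Int) :
    PySem.List.min? [a, b] f = some (if f b < f a then b else a) := by
  simp [PySem.List.min?]
  split_ifs <;> rfl

lemma min?_single (a : Int) (f : Int → Int) : PySem.List.min? [a] f = some a := by
  simp [PySem.List.min?]

lemma per_element (target : List Int) (ts : Int) (hne : target ≠ []) :
    A1 target ts = B1 target ts := by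
  have hn : 0 < target.length := List.length_pos_iff.mpr hne
  rw [A1, B1, bisect_eq_locate target ts]
  set pos := locate target ts with hposdef
  have hple : pos ≤ target.length := by
    have h := (bisect_bounds target ts (target.length - 0) 0 target.length (by omega)).2
    rw [hposdef, ← bisect_eq_locate target ts]
    exact h
  by_cases h0 : pos = 0
  · rw [if_pos h0, h0]
    have hc : ([((0 : Nat) : Int) - 1, ((0 : Nat) : Int)].filter
        (fun i => decide (0 ≤ i) && decide (i < (target.length : Int)))) = [(0 : Int)] := by
      simp [List.filter, hn]
    rw [hc, min?_single]
    rfl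
  · rw [if_neg h0]
    by_cases hN : pos = target.length
    · rw [if_pos hN, hN]
      have h5 : 1 ≤ target.length := hn
      have hc : ([((target.length : Nat) : Int) - 1, ((target.length : Nat) : Int)].filter
          (fun i => decide (0 ≤ i) && decide (i < (target.length : Int)))) = [(target.length : Int) - 1] := by
        simp [List.filter, h5]
      rw [hc, min?_single]
      rfl
    · rw [if_neg hN]
      have h1 : (0 : Int) ≤ (pos : Int) - 1 := by omega
      have h2 : (pos : Int) - 1 < (target.length : Int) := by omega
      have h3 : (0 : Int) ≤ (pos : Int) := by omega
      have h4 : (pos : Int) < (target.length : Int) := by omega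
      have hp1 : 1 ≤ pos := by omega
      have hp2' : pos ≤ target.length := hple
      have hp3' : pos < target.length := by omega
      have hc : ([((pos : Nat) : Int) - 1, ((pos : Nat) : Int)].filter
          (fun i => decide (0 ≤ i) && decide (i < (target.length : Int))))
          = [((pos : Int) - 1), (pos : Int)] := by
        simp [List.filter, hp1, hp2', hp3']
      rw [hc, min?_pair]
      split_ifs with hcmp <;> rfl

-- ===== VERDICT (by name: the statement is the Claim_ definition above) =====
theorem align_to_spec : Claim_equal_align_to := by
  intro reference_ts target_ts _hdom hpre
  unfold Spec_align_to
  rw [align_to_eq_map, alt_eq_map]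
  rcases hpre with hre | hte
  · rw [hre]; rfl
  · exact List.map_congr_left (fun ts _ => per_element target_ts ts hte)
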